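-- pv_equiv track=rewrite | github.com/awilkins/advent | advent/day_13/incidence.py | answer_1
-- ===== SOURCE A (Python) =====
-- from typing import Sequence, List
--
-- class Pattern:
--
--     field: List[List[str]]
--
--     def __init__(self, lines):
--         self.field = [
--             list(line) for line in lines
--         ]
--
--     def rows(self):
--         return self.field
--
--     def columns(self):
--         return [
--             [line[xx] for line in self.field]
--             for xx in range(len(self.field[0]))
--         ]
--
--     def is_vertical_reflection(self, xx):
--         cols = self.columns()
--         if xx > (len(self.field[0]) / 2):
--             right_slice = cols[xx:]
--             left_slice = cols[xx - len(right_slice):xx]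
--         else:
--             left_slice = cols[0:xx]
--             right_slice = cols[xx:xx + len(left_slice)]
--         return right_slice[::-1] == left_slice
--
--     def is_horizontal_reflection(self, yy):
--         rows = self.rows()
--         if yy > (len(self.field) / 2):
--             top_slice = rows[yy:]
--             bottom_slice = rows[yy - len(top_slice):yy]
--         else:
--             bottom_slice = rows[0:yy]
--             top_slice = rows[yy:yy + len(bottom_slice)]
--         return top_slice[::-1] == bottom_slice
--
--     def find_reflection(self):
--         vflec = 0
--         hflec = 0
--         for xx in range(1, len(self.field[0])):
--             if self.is_vertical_reflection(xx):
--                 vflec = xx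
--         for yy in range(1, len(self.field)):
--             if self.is_horizontal_reflection(yy):
--                 hflec = yy
--
--         return vflec, hflec
--
--     def find_other_reflection(self, other):
--         vflec = 0
--         hflec = 0
--         for xx in range(1, len(self.field[0])):
--             if other[0] != xx and self.is_vertical_reflection(xx):
--                 vflec = xx
--         for yy in range(1, len(self.field)):
--             if other[1] != yy and self.is_horizontal_reflection(yy):
--                 hflec = yy
--
--         return vflec, hflec
--
-- def pattern_generator(lines: Sequence[str]):
--     plines = []
--     for line in lines:
--         if line == '':
--             yield Pattern(plines)
--             plines = []
--         else:
--             plines.append(line)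
--     if len(plines):
--         yield Pattern(plines)
--
-- def answer_1(lines: Sequence[str]):
--     pg = pattern_generator(lines)
--
--     vt = 0
--     ht = 0
--     for p in pg:
--         v, h = p.find_reflection()
--         vt += v
--         ht += h
--
--     return (ht * 100) + vt
-- ===== SOURCE B (Python) =====
-- def _find_mirror(ls):
--     n = len(ls)
--     best = 0
--     for i in range(1, n):
--         l, r = i - 1, i
--         while l >= 0 and r < n and ls[l] == ls[r]:
--             l -= 1
--             r += 1
--         if l < 0 or r == n:
--             best = i
--     return best
--
--
-- def _score(block):
--     grid = [list(line) for line in block]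
--     cols = [[row[x] for row in grid] for x in range(len(grid[0]))]
--     return 100 * _find_mirror(grid) + _find_mirror(cols)
--
--
-- def answer_1(lines):
--     total = 0
--     block = []
--     for line in lines:
--         if line == '':
--             if block:
--                 total += _score(block)
--             block = []
--         else:
--             block.append(line)
--     if block:
--         total += _score(block)
--     return total
-- ===== Notes on version B (the rewrite author's own statement) =====
-- stated objective: alternative
-- what changed: Per pattern, B builds the column lists once and tests each candidate axis with a single two-pointer expansion in one accumulating pass, instead of A's class that recomputes columns() for every candidate axis and compares a reversed slice against a slice with a half-dependent branch.
-- outside the precondition, e.g. on answer_1(['##', '#']): A raises IndexError, B raises IndexError; on answer_1(['', '##', '##']): A raises IndexError, B returns 101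
import Mathlib
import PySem

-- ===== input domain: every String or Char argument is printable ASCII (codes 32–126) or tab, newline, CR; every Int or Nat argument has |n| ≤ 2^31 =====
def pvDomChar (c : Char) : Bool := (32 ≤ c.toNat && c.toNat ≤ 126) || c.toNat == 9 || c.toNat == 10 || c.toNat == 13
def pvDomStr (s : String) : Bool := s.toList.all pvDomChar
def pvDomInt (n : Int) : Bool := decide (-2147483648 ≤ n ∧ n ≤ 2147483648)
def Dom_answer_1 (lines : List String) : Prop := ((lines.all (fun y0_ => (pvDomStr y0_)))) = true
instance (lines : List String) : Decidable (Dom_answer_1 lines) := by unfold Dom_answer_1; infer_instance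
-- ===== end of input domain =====

-- B replaces A's per-axis slice-reverse comparison (with columns recomputed for every
-- candidate axis) by one pattern pass that builds the columns once and checks each axis
-- with a single two-pointer expansion; objective: alternative decomposition.

-- ===== PORT A =====
-- Pattern.columns: [[line[xx] for line in field] for xx in range(len(field[0]))].
-- line.getD xx ' ' is exact inside Pre_answer_1 (index in range; the default is never read).
def pvColumns (field : List (List Char)) : List (List Char) :=
  (List.range field.headI.length).map (fun xx => field.map (fun line => line.getD xx ' '))

-- is_vertical_reflection / is_horizontal_reflection share one body in Python (textually
-- identical up to rows/columns); `ls` is the list they slice.  `xx > len/2` (true division)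
-- is transliterated as `2 * xx > len`, exact for integers.
def pvIsRefl (ls : List (List Char)) (xx : Nat) : Bool :=
  if 2 * xx > ls.length then
    let rightSlice := PySem.List.slice ls (some (xx : Int)) none
    let leftSlice := PySem.List.slice ls (some ((xx : Int) - rightSlice.length)) (some (xx : Int))
    rightSlice.reverse == leftSlice
  else
    let leftSlice := PySem.List.slice ls (some (0 : Int)) (some (xx : Int))
    let rightSlice := PySem.List.slice ls (some (xx : Int)) (some ((xx : Int) + leftSlice.length))
    rightSlice.reverse == leftSlice

-- find_reflection: range(1, len) loops keeping the LAST matching axis; the vertical test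
-- recomputes self.columns() on every call, as the Python does.
-- field[0] is `headI` (exact inside Pre_answer_1, where every pattern is nonempty).
def pvFindReflection (field : List (List Char)) : Int × Int :=
  let vflec := (List.range' 1 (field.headI.length - 1)).foldl
    (fun vflec xx => if pvIsRefl (pvColumns field) xx then (xx : Int) else vflec) 0
  let hflec := (List.range' 1 (field.length - 1)).foldl
    (fun hflec yy => if pvIsRefl field yy then (yy : Int) else hflec) 0
  (vflec, hflec)

-- pattern_generator, run eagerly: the list of the yielded Pattern fields.
def pvPatternGen (lines : List String) : List (List (List Char)) :=
  let st := lines.foldl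
    (fun (st : List String × List (List (List Char))) line =>
      if line = "" then ([], st.2 ++ [st.1.map String.toList])
      else (st.1 ++ [line], st.2)) ([], [])
  if st.1.length ≠ 0 then st.2 ++ [st.1.map String.toList] else st.2

def answer_1 (lines : List String) : Int :=
  let st := (pvPatternGen lines).foldl
    (fun (st : Int × Int) p =>
      let vh := pvFindReflection p
      (st.1 + vh.1, st.2 + vh.2)) (0, 0)
  st.2 * 100 + st.1

-- ===== PORT B =====
-- the `while l >= 0 and r < n and ls[l] == ls[r]` expansion; true iff a pointer walked off.
def pvReflects (ls : List (List Char)) (l : Int) (r : Nat) : Bool :=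
  if h : 0 ≤ l ∧ r < ls.length then
    if ls.getD l.toNat [] == ls.getD r [] then pvReflects ls (l - 1) (r + 1) else false
  else true
termination_by ls.length - r

def pvFindMirror (ls : List (List Char)) : Int :=
  (List.range' 1 (ls.length - 1)).foldl
    (fun (best : Int) (i : Nat) => if pvReflects ls ((i : Int) - 1) i then (i : Int) else best) 0

-- row[x] is exact inside Pre_answer_1 (index in range; the default is never read).
def pvScore (block : List String) : Int :=
  let grid := block.map (fun line => line.toList)
  let cols := (List.range grid.headI.length).map (fun x => grid.map (fun row => row.getD x ' '))
  100 * pvFindMirror grid + pvFindMirror cols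

def answer_1_alt (lines : List String) : Int :=
  let st := lines.foldl
    (fun (st : List String × Int) line =>
      if line = "" then ([], if st.1 ≠ [] then st.2 + pvScore st.1 else st.2)
      else (st.1 ++ [line], st.2)) ([], 0)
  if st.1 ≠ [] then st.2 + pvScore st.1 else st.2

-- ===== PRECONDITION & SPEC =====
-- the blank-line-separated blocks of the input, as the generator yields them
-- (a block per blank line, plus the trailing block if nonempty)
def pvSegs : List String → List String → List (List String)
  | plines, [] => if plines = [] then [] else [plines]
  | plines, l :: ls => if l = "" then plines :: pvSegs [] ls else pvSegs (plines ++ [l]) ls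

-- Pre_ excludes exactly the inputs where Python A raises IndexError: a blank-separated
-- block that is empty (field[0] fails) or contains a line shorter than its first line
-- (line[xx] in columns() fails).
def Pre_answer_1 (lines : List String) : Prop :=
  ∀ b ∈ pvSegs [] lines, b ≠ [] ∧ ∀ s ∈ b, b.headI.length ≤ s.length

instance (lines : List String) : Decidable (Pre_answer_1 lines) := by
  unfold Pre_answer_1; infer_instance

def pvWitness_answer_1 : List String := ["#.#", "...", "#.#", "", "ab", "ab"]

def Spec_answer_1 (lines : List String) (out : Int) : Prop := out = answer_1_alt lines
instance (lines : List String) (out : Int) : Decidable (Spec_answer_1 lines out) := by unfold Spec_answer_1; infer_instance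

-- ===== CLAIM (what is proved, stated in full; the proofs are below) =====
def Claim_equal_answer_1 : Prop := ∀ (lines : List String), Dom_answer_1 lines → Pre_answer_1 lines → Spec_answer_1 lines (answer_1 lines)

-- ===== LEMMAS AND PROOFS =====

-- B's two-pointer loop returns true iff every pair it would visit matches.
lemma pvReflects_iff (ls : List (List Char)) (l : Int) (r : Nat) :
    pvReflects ls l r = true ↔
      ∀ k : Nat, (k : Int) ≤ l → r + k < ls.length →
        ls.getD (l - k).toNat [] = ls.getD (r + k) [] := by
  induction l, r using pvReflects.induct ls with
  | case1 l r h heq ih =>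
    rw [pvReflects, dif_pos h, if_pos heq]
    rw [beq_iff_eq] at heq
    rw [ih]
    constructor
    · intro H k hk hlen
      match k with
      | 0 => simpa using heq
      | (k' + 1) =>
        have e1 : l - 1 - (k' : Int) = l - ((k' + 1 : Nat) : Int) := by push_cast; ring
        have e2 : r + 1 + k' = r + (k' + 1) := by omega
        rw [← e1, ← e2]
        exact H k' (by push_cast at hk ⊢; omega) (by omega)
    · intro H k hk hlen
      have e1 : l - 1 - (k : Int) = l - ((k + 1 : Nat) : Int) := by push_cast; ring
      have e2 : r + 1 + k = r + (k + 1) := by omega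
      rw [e1, e2]
      exact H (k + 1) (by push_cast; omega) (by omega)
  | case2 l r h heq =>
    rw [pvReflects, dif_pos h, if_neg heq]
    simp only [Bool.false_eq_true, false_iff]
    intro H
    have h0 := H 0 (by omega) (by omega)
    simp only [beq_iff_eq] at heq
    exact heq (by simpa using h0)
  | case3 l r h =>
    rw [pvReflects, dif_neg h]
    constructor
    · intro _ k hk hlen
      exfalso; omega
    · intro _; rfl

-- a segment of ls written as a map over its index range
lemma seg_eq (ls : List (List Char)) (a m : Nat) (h : a + m ≤ ls.length) :
    (ls.drop a).take m = (List.range m).map (fun k => ls.getD (a + k) []) := by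
  apply List.ext_getElem
  · simp; omega
  · intro j h1 h2
    simp only [List.length_take, List.length_drop] at h1
    simp only [List.getElem_take, List.getElem_drop, List.getElem_map, List.getElem_range]
    rw [List.getD_eq_getElem _ _ (by omega)]

lemma rev_seg_eq (ls : List (List Char)) (i m : Nat) (h : i + m ≤ ls.length) :
    ((ls.drop i).take m).reverse = (List.range m).map (fun k => ls.getD (i + m - 1 - k) []) := by
  apply List.ext_getElem
  · simp; omega
  · intro j h1 h2
    simp only [List.length_reverse, List.length_take, List.length_drop] at h1
    rw [List.getElem_reverse]
    simp only [List.getElem_take, List.getElem_drop, List.getElem_map, List.getElem_range,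
      List.length_take, List.length_drop]
    rw [List.getD_eq_getElem _ _ (by omega)]
    congr 1
    omega

-- the shared mirror characterisation both per-axis checks reduce to
lemma mirror_char (ls : List (List Char)) (i m : Nat) (him : m ≤ i) (h2 : i + m ≤ ls.length) :
    ((((ls.drop i).take m).reverse = (ls.drop (i - m)).take m) ↔
      ∀ k, k < m → ls.getD (i - 1 - k) [] = ls.getD (i + k) []) := by
  rw [rev_seg_eq ls i m h2, seg_eq ls (i - m) m (by omega), List.map_inj_left]
  constructor
  · intro H k hk
    have := H (m - 1 - k) (by simp; omega)
    have e1 : i + m - 1 - (m - 1 - k) = i + k := by omega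
    have e2 : i - m + (m - 1 - k) = i - 1 - k := by omega
    rw [e1, e2] at this
    exact this.symm
  · intro H j hj
    simp only [List.mem_range] at hj
    have := H (m - 1 - j) (by omega)
    have e1 : i - 1 - (m - 1 - j) = i - m + j := by omega
    have e2 : i + (m - 1 - j) = i + m - 1 - j := by omega
    rw [e1, e2] at this
    exact this.symm

-- A's slice-reverse check at axis i equals the mirror characterisation at m = min i (n-i).
lemma pvIsRefl_iff (ls : List (List Char)) (i : Nat) (_h1 : 1 ≤ i) (h2 : i < ls.length) :
    pvIsRefl ls i = true ↔
      ∀ k : Nat, k < i → i + k < ls.length →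
        ls.getD (i - 1 - k) [] = ls.getD (i + k) [] := by
  unfold pvIsRefl
  by_cases hbr : 2 * i > ls.length
  · rw [if_pos hbr]
    simp only [PySem.List.slice_from_natCast, List.length_drop]
    rw [show (i : Int) - ((ls.length - i : Nat) : Int) = ((i - (ls.length - i) : Nat) : Int) by
      omega]
    rw [PySem.List.slice_natCast]
    rw [show i - (i - (ls.length - i)) = ls.length - i by omega]
    rw [show ls.drop i = (ls.drop i).take (ls.length - i) from
      (List.take_of_length_le (by simp)).symm]
    rw [beq_iff_eq, mirror_char ls i (ls.length - i) (by omega) (by omega)]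
    constructor
    · intro H k hk hlen2; exact H k (by omega)
    · intro H k hk; exact H k (by omega) (by omega)
  · rw [if_neg hbr]
    simp only [PySem.List.slice_zero_start, PySem.List.slice_to_natCast, List.length_take]
    rw [show min i ls.length = i by omega]
    rw [PySem.List.slice_natCast_add]
    rw [show ls.take i = (ls.drop (i - i)).take i by simp]
    rw [beq_iff_eq, mirror_char ls i i (le_refl i) (by omega)]
    constructor
    · intro H k hk hlen2; exact H k hk
    · intro H k hk; exact H k hk (by omega)

lemma key (ls : List (List Char)) (i : Nat) (h1 : 1 ≤ i) (h2 : i < ls.length) :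
    pvIsRefl ls i = pvReflects ls ((i : Int) - 1) i := by
  rw [← Bool.coe_iff_coe, pvIsRefl_iff ls i h1 h2, pvReflects_iff]
  constructor
  · intro H k hk hlen
    have hki : k < i := by omega
    rw [show ((i : Int) - 1 - k).toNat = i - 1 - k by omega]
    exact H k hki hlen
  · intro H k hk hlen
    have := H k (by omega) hlen
    rwa [show ((i : Int) - 1 - k).toNat = i - 1 - k by omega] at this

lemma findMirror_eq (ls : List (List Char)) (n : Nat) (hn : n = ls.length) :
    (List.range' 1 (n - 1)).foldl
      (fun best xx => if pvIsRefl ls xx then (xx : Int) else best) 0 = pvFindMirror ls := by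
  subst hn
  unfold pvFindMirror
  apply PySem.List.foldl_congr_mem
  intro acc x hx
  have hm := List.mem_range'_1.mp hx
  rw [key ls x hm.1 (by omega)]

lemma length_pvColumns (field : List (List Char)) :
    (pvColumns field).length = field.headI.length := by
  simp [pvColumns]

lemma findRefl_eq (field : List (List Char)) :
    pvFindReflection field = (pvFindMirror (pvColumns field), pvFindMirror field) := by
  unfold pvFindReflection
  rw [show field.headI.length = (pvColumns field).length from (length_pvColumns field).symm]
  rw [findMirror_eq (pvColumns field) _ rfl, findMirror_eq field _ rfl]

lemma pvScore_eq (b : List String) :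
    pvScore b = (pvFindReflection (b.map String.toList)).2 * 100
      + (pvFindReflection (b.map String.toList)).1 := by
  rw [findRefl_eq]
  show 100 * pvFindMirror (b.map String.toList) + pvFindMirror (pvColumns (b.map String.toList)) = _
  ring

lemma patternGen_eq : ∀ (lines plines : List String) (out : List (List (List Char))),
    (let st := lines.foldl
        (fun (st : List String × List (List (List Char))) line =>
          if line = "" then ([], st.2 ++ [st.1.map String.toList])
          else (st.1 ++ [line], st.2)) (plines, out)
     if st.1.length ≠ 0 then st.2 ++ [st.1.map String.toList] else st.2)
    = out ++ (pvSegs plines lines).map (fun b => b.map String.toList) := by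
  intro lines
  induction lines with
  | nil =>
    intro plines out
    by_cases h : plines = [] <;> simp [pvSegs, h]
  | cons l ls ih =>
    intro plines out
    by_cases h : l = "" <;> simp only [List.foldl_cons, pvSegs, h, if_pos, if_neg,
      ite_true, ite_false, reduceIte] <;> rw [ih] <;> simp

lemma sumA : ∀ (pats : List (List (List Char))) (vt ht : Int),
    (let st := pats.foldl
        (fun (st : Int × Int) p =>
          let vh := pvFindReflection p
          (st.1 + vh.1, st.2 + vh.2)) (vt, ht)
     st.2 * 100 + st.1)
    = ht * 100 + vt
      + (pats.map (fun p => (pvFindReflection p).2 * 100 + (pvFindReflection p).1)).sum := by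
  intro pats
  induction pats with
  | nil => intro vt ht; simp
  | cons p ps ih =>
    intro vt ht
    simp only [List.foldl_cons, List.map_cons, List.sum_cons]
    rw [ih]
    ring

lemma altB : ∀ (lines plines : List String) (t : Int),
    (let st := lines.foldl
        (fun (st : List String × Int) line =>
          if line = "" then ([], if st.1 ≠ [] then st.2 + pvScore st.1 else st.2)
          else (st.1 ++ [line], st.2)) (plines, t)
     if st.1 ≠ [] then st.2 + pvScore st.1 else st.2)
    = t + ((pvSegs plines lines).map (fun b => if b ≠ [] then pvScore b else 0)).sum := by
  intro lines
  induction lines with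
  | nil =>
    intro plines t
    by_cases h : plines = [] <;> simp [pvSegs, h]
  | cons l ls ih =>
    intro plines t
    by_cases h : l = "" <;> simp only [List.foldl_cons, pvSegs, h, if_pos, if_neg,
      ite_true, ite_false, reduceIte] <;> rw [ih] <;> by_cases hp : plines = [] <;>
      simp [hp] <;> ring

lemma perBlock (b : List String) :
    (pvFindReflection (b.map String.toList)).2 * 100 + (pvFindReflection (b.map String.toList)).1
      = if b ≠ [] then pvScore b else 0 := by
  by_cases h : b = []
  · subst h; simp only [List.map_nil]; decide
  · rw [if_pos h, pvScore_eq]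

lemma main_eq (lines : List String) : answer_1 lines = answer_1_alt lines := by
  show (let st := (pvPatternGen lines).foldl _ (0, 0); st.2 * 100 + st.1) = _
  rw [show pvPatternGen lines
      = [] ++ (pvSegs [] lines).map (fun b => b.map String.toList) from patternGen_eq lines [] []]
  rw [sumA]
  show _ = (let st := lines.foldl _ ([], 0); if st.1 ≠ [] then st.2 + pvScore st.1 else st.2)
  rw [altB lines [] 0]
  simp only [List.nil_append, List.map_map, zero_add, zero_mul, add_zero]
  congr 1
  apply List.map_congr_left
  intro b _
  exact perBlock b

-- ===== VERDICT (by name: the statement is the Claim_ definition above) =====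
theorem answer_1_spec : Claim_equal_answer_1 := by
  intro lines _ _
  exact main_eq lines
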